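-- pv_equiv track=rewrite | github.com/mortyc126-debug/SHA-256 | exp6_carry_dga.py | carry_chain_lengths
-- ===== SOURCE A (Python) =====
-- def carry_chain_lengths(gkp):
--     """Find lengths of consecutive P (propagate) chains."""
--     chains = []
--     current = 0
--     for c in gkp:
--         if c == 'P':
--             current += 1
--         else:
--             if current > 0:
--                 chains.append(current)
--             current = 0
--     if current > 0:
--         chains.append(current)
--     return chains
-- ===== SOURCE B (Python) =====
-- def carry_chain_lengths(gkp):
--     """Find lengths of consecutive P (propagate) chains."""
--     out = []
--     i, n = 0, len(gkp)
--     while i < n: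
--         j = i + 1
--         while j < n and gkp[j] == gkp[i]:
--             j += 1
--         if gkp[i] == 'P':
--             out.append(j - i)
--         i = j
--     return out
-- ===== Notes on version B (the rewrite author's own statement) =====
-- stated objective: alternative
-- what changed: Replaces A's per-character counter-and-flush state machine with a two-pointer run scanner that jumps over each maximal run of equal characters at once and emits its length directly when the run character is 'P' (no running counter, no post-loop flush).
import Mathlib
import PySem

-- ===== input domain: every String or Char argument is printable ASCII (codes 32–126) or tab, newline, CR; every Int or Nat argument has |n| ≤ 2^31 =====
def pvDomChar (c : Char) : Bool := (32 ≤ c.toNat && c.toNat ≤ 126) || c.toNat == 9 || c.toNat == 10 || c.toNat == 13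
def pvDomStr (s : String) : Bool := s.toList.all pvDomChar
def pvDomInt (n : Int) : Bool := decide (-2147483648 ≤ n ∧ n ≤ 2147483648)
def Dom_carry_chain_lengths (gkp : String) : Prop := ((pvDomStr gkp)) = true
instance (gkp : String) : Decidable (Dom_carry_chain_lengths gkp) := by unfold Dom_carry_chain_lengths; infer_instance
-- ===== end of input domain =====

-- B replaces A's counter-and-flush state machine by a two-pointer run scanner (alternative decomposition, same O(n) cost).

-- ===== PORT A =====
-- A's for-loop over the characters, carrying (chains, current); the trailing
-- 'if current > 0: chains.append(current)' is the [] case.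
def pvALoop : List Char → List Int → Int → List Int
  | [], chains, current => if current > 0 then chains ++ [current] else chains
  | c :: cs, chains, current =>
    if c = 'P' then pvALoop cs chains (current + 1)
    else pvALoop cs (if current > 0 then chains ++ [current] else chains) 0

def carry_chain_lengths (gkp : String) : List Int := pvALoop gkp.toList [] 0

-- ===== PORT B =====
-- Source B's outer while loop: each step consumes one maximal run (the inner
-- 'while gkp[j] == gkp[i]' is takeWhile/dropWhile) and emits its length if the
-- run character is 'P'.
def pvBLoop : List Char → List Int
  | [] => []
  | c :: cs =>
    let pre := cs.takeWhile (· == c)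
    let rest := cs.dropWhile (· == c)
    if c = 'P' then ((pre.length + 1 : Nat) : Int) :: pvBLoop rest else pvBLoop rest
termination_by l => l.length
decreasing_by
  all_goals exact Nat.lt_succ_of_le (List.length_dropWhile_le _ _)

def carry_chain_lengths_alt (gkp : String) : List Int := pvBLoop gkp.toList

-- ===== PRECONDITION & SPEC =====
def Spec_carry_chain_lengths (gkp : String) (out : List Int) : Prop := out = carry_chain_lengths_alt gkp
instance (gkp : String) (out : List Int) : Decidable (Spec_carry_chain_lengths gkp out) := by unfold Spec_carry_chain_lengths; infer_instance

-- ===== CLAIM (what is proved, stated in full; the proofs are below) =====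
def Claim_equal_carry_chain_lengths : Prop := ∀ (gkp : String), Dom_carry_chain_lengths gkp → Spec_carry_chain_lengths gkp (carry_chain_lengths gkp)

-- ===== LEMMAS AND PROOFS =====

theorem pvALoop_acc (l : List Char) (chains : List Int) (current : Int) :
    pvALoop l chains current = chains ++ pvALoop l [] current := by
  induction l generalizing chains current with
  | nil => simp only [pvALoop]; split <;> simp
  | cons c cs ih =>
    simp only [pvALoop, List.nil_append]
    split
    · exact ih chains (current + 1)
    · split
      · rw [ih (chains ++ [current]) 0, ih [current] 0]; simp
      · exact ih chains 0

theorem pvALoop_skip (pre : List Char) (h : ∀ x ∈ pre, x ≠ 'P') (rest : List Char) :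
    pvALoop (pre ++ rest) [] 0 = pvALoop rest [] 0 := by
  induction pre with
  | nil => rfl
  | cons x xs ih =>
    have hx : x ≠ 'P' := h x (by simp)
    simp only [List.cons_append, pvALoop, if_neg hx]
    simpa using ih (fun y hy => h y (by simp [hy]))

theorem pvALoop_ps (pre : List Char) (h : ∀ x ∈ pre, x = 'P') (rest : List Char) (current : Int) :
    pvALoop (pre ++ rest) [] current = pvALoop rest [] (current + pre.length) := by
  induction pre generalizing current with
  | nil => simp
  | cons x xs ih =>
    have hx : x = 'P' := h x (by simp)
    simp only [List.cons_append, pvALoop, if_pos hx]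
    rw [ih (fun y hy => h y (by simp [hy])) (current + 1)]
    congr 1
    simp only [List.length_cons]
    push_cast
    ring

theorem dropWhile_head_not (p : Char → Bool) (l : List Char) (d : Char) (ds : List Char)
    (h : l.dropWhile p = d :: ds) : p d = false := by
  induction l with
  | nil => simp at h
  | cons x xs ih =>
    by_cases hx : p x
    · rw [List.dropWhile_cons_of_pos hx] at h; exact ih h
    · rw [List.dropWhile_cons_of_neg hx] at h
      cases h; simpa using hx

theorem pv_main : ∀ (n : ℕ) (l : List Char), l.length ≤ n → pvALoop l [] 0 = pvBLoop l := by
  intro n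
  induction n with
  | zero =>
    intro l hl
    have : l = [] := List.eq_nil_of_length_eq_zero (Nat.le_zero.mp hl)
    subst this; simp [pvALoop, pvBLoop]
  | succ n ih =>
    intro l hl
    match l with
    | [] => simp [pvALoop, pvBLoop]
    | c :: cs =>
      have hsplit : cs.takeWhile (· == c) ++ cs.dropWhile (· == c) = cs :=
        List.takeWhile_append_dropWhile
      have hrestle : (cs.dropWhile (· == c)).length ≤ n :=
        le_trans (List.length_dropWhile_le _ _) (Nat.succ_le_succ_iff.mp hl)
      by_cases hc : c = 'P'
      · -- run of P's
        have hpre : ∀ x ∈ cs.takeWhile (· == c), x = 'P' := by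
          intro x hx
          have := List.mem_takeWhile_imp hx
          simp at this; simp [this, hc]
        have h1 : pvALoop (c :: cs) [] 0
            = pvALoop (cs.dropWhile (· == c)) [] (0 + 1 + (cs.takeWhile (· == c)).length) := by
          simp only [pvALoop, if_pos hc]
          conv_lhs => rw [← hsplit]
          exact pvALoop_ps _ hpre _ _
        rw [h1]
        simp only [pvBLoop, if_pos hc]
        have hK : (0:ℤ) < 0 + 1 + (cs.takeWhile (· == c)).length := by positivity
        match hrest : cs.dropWhile (· == c) with
        | [] =>
          simp only [pvALoop, if_pos hK, List.nil_append, pvBLoop]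
          congr 1
          push_cast
          ring
        | d :: ds =>
          have hdc : (d == c) = false := dropWhile_head_not _ cs d ds hrest
          have hd : d ≠ 'P' := by
            intro h; rw [h, hc] at hdc; simp at hdc
          simp only [pvALoop, if_neg hd, if_pos hK]
          rw [pvALoop_acc]
          have h2 : pvALoop ds [] 0 = pvALoop (cs.dropWhile (· == c)) [] 0 := by
            rw [hrest]
            simp [pvALoop, if_neg hd]
          rw [h2, ih _ hrestle, hrest]
          simp only [List.nil_append, List.cons_append]
          congr 1
          push_cast
          ring
      · -- run of non-P's
        have hpre : ∀ x ∈ cs.takeWhile (· == c), x ≠ 'P' := by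
          intro x hx
          have := List.mem_takeWhile_imp hx
          simp at this; simp [this, hc]
        have h1 : pvALoop (c :: cs) [] 0 = pvALoop (cs.dropWhile (· == c)) [] 0 := by
          simp only [pvALoop, if_neg hc]
          norm_num
          conv_lhs => rw [← hsplit]
          exact pvALoop_skip _ hpre _
        rw [h1, ih _ hrestle]
        simp only [pvBLoop, if_neg hc]

-- ===== VERDICT (by name: the statement is the Claim_ definition above) =====
theorem carry_chain_lengths_spec : Claim_equal_carry_chain_lengths := by
  intro gkp _
  unfold Spec_carry_chain_lengths carry_chain_lengths carry_chain_lengths_alt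
  exact pv_main gkp.toList.length gkp.toList le_rfl
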